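-- pv_equiv track=rewrite | github.com/bzhan/holpy | smt/veriT/verit_macro.py | try_resolve
-- ===== SOURCE A (Python) =====
-- def try_resolve(prop1, prop2):
--     """Try to resolve two propositions."""
--     for i in range(len(prop1)):
--         ai, ni = prop1[i]
--         for j in range(len(prop2)):
--             aj, nj = prop2[j]
--             if ai == aj and ni + 1 == nj:
--                 return 'left', i, j
--             if ai == aj and ni == nj + 1:
--                 return 'right', i, j
--     return None
-- ===== SOURCE B (Python) =====
-- def try_resolve(prop1, prop2):
--     """Try to resolve two propositions."""
--     first = {}
--     for j, lit in enumerate(prop2):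
--         if lit not in first:
--             first[lit] = j
--     for i, (a, n) in enumerate(prop1):
--         l = first.get((a, n + 1))
--         r = first.get((a, n - 1))
--         if l is not None and (r is None or l < r):
--             return 'left', i, l
--         if r is not None:
--             return 'right', i, r
--     return None
-- ===== Notes on version B (the rewrite author's own statement) =====
-- stated objective: faster
-- what changed: Replaces the nested O(n*m) scan with a dict indexing prop2 literals by value (first occurrence), so each prop1 literal does two O(1) lookups (n+1 and n-1) and the tag is chosen by comparing the two candidate indices.
import Mathlib
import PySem

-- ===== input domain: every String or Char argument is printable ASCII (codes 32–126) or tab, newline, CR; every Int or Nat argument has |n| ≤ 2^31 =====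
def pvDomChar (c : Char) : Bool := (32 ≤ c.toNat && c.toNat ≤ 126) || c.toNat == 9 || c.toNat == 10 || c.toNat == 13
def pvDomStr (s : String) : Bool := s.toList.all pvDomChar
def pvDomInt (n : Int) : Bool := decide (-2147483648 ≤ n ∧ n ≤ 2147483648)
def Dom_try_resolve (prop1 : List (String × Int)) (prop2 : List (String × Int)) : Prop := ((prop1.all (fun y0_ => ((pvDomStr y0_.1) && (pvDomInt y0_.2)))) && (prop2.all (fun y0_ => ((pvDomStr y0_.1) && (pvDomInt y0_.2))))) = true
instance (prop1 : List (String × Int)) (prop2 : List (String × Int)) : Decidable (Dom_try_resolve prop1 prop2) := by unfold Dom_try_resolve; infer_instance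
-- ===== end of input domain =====

-- B replaces A's nested scan with a first-occurrence index of prop2's literals, looked up twice per prop1 literal (objective: faster, asymptotic).


-- ===== PORT A =====
-- inner 'for j in range(len(prop2))' loop of A, with j the running index
def tryResolveInnerA (a : String) (n : Int) (i : Int) : List (String × Int) → Int → Option (String × Int × Int)
  | [], _ => none
  | (aj, nj) :: rest, j =>
    if a = aj ∧ n + 1 = nj then some ("left", i, j)
    else if a = aj ∧ n = nj + 1 then some ("right", i, j)
    else tryResolveInnerA a n i rest (j + 1)

-- outer 'for i in range(len(prop1))' loop of A
def tryResolveOuterA (prop2 : List (String × Int)) : List (String × Int) → Int → Option (String × Int × Int)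
  | [], _ => none
  | (a, n) :: rest, i =>
    match tryResolveInnerA a n i prop2 0 with
    | some r => some r
    | none => tryResolveOuterA prop2 rest (i + 1)

def try_resolve (prop1 : List (String × Int)) (prop2 : List (String × Int)) : Option (String × Int × Int) :=
  tryResolveOuterA prop2 prop1 0

-- ===== PORT B =====
-- 'for j, lit in enumerate(prop2): if lit not in first: first[lit] = j'
def tryResolveBuildFirst : List (String × Int) → Int → PySem.Dict (String × Int) Int → PySem.Dict (String × Int) Int
  | [], _, d => d
  | lit :: rest, j, d => tryResolveBuildFirst rest (j + 1) (if d.contains lit then d else d.insert lit j)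

-- 'for i, (a, n) in enumerate(prop1): …' loop of B, two dict lookups per literal
def tryResolveOuterB (first : PySem.Dict (String × Int) Int) : List (String × Int) → Int → Option (String × Int × Int)
  | [], _ => none
  | (a, n) :: rest, i =>
    match first.get? (a, n + 1), first.get? (a, n - 1) with
    | some l, none => some ("left", i, l)
    | some l, some r => if l < r then some ("left", i, l) else some ("right", i, r)
    | none, some r => some ("right", i, r)
    | none, none => tryResolveOuterB first rest (i + 1)

def try_resolve_alt (prop1 : List (String × Int)) (prop2 : List (String × Int)) : Option (String × Int × Int) :=
  tryResolveOuterB (tryResolveBuildFirst prop2 0 PySem.Dict.empty) prop1 0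

-- ===== PRECONDITION & SPEC =====
def Spec_try_resolve (prop1 : List (String × Int)) (prop2 : List (String × Int)) (out : Option (String × Int × Int)) : Prop := out = try_resolve_alt prop1 prop2
instance (prop1 : List (String × Int)) (prop2 : List (String × Int)) (out : Option (String × Int × Int)) : Decidable (Spec_try_resolve prop1 prop2 out) := by unfold Spec_try_resolve; infer_instance

-- ===== CLAIM (what is proved, stated in full; the proofs are below) =====
def Claim_equal_try_resolve : Prop := ∀ (prop1 : List (String × Int)) (prop2 : List (String × Int)), Dom_try_resolve prop1 prop2 → Spec_try_resolve prop1 prop2 (try_resolve prop1 prop2)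

-- ===== LEMMAS AND PROOFS =====\n
-- the first-occurrence dict looks up the first index of a key in the scanned list
theorem build_get (l : List (String × Int)) (j : Int) (d : PySem.Dict (String × Int) Int) (k : String × Int) :
    (tryResolveBuildFirst l j d).get? k =
      (d.get? k).or ((PySem.List.index? l k).map (fun t => j + (t : Int))) := by
  induction l generalizing j d with
  | nil => simp [tryResolveBuildFirst, PySem.List.index?]
  | cons lit rest ih =>
    simp only [tryResolveBuildFirst]
    by_cases hk : lit = k
    · subst hk
      rw [ih, PySem.List.index?_cons_self]
      by_cases hc : d.contains lit = true
      · rw [if_pos hc]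
        obtain ⟨v, hv⟩ : ∃ v, d.get? lit = some v :=
          Option.isSome_iff_exists.mp (by rw [← PySem.Dict.contains_eq_isSome_get?]; exact hc)
        simp [hv]
      · rw [if_neg hc, PySem.Dict.get?_insert_self]
        have hd : d.get? lit = none := by
          rw [PySem.Dict.get?_eq_none_iff_contains]; simpa using hc
        simp [hd]
    · rw [ih, PySem.List.index?_cons_of_ne rest hk]
      by_cases hc : d.contains lit = true
      · rw [if_pos hc]
        cases hrest : PySem.List.index? rest k with
        | none => simp
        | some t =>
          cases hg : d.get? k with
          | none => simp; omega
          | some v => simp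
      · rw [if_neg hc, PySem.Dict.get?_insert_of_ne d j (Ne.symm hk)]
        cases hrest : PySem.List.index? rest k with
        | none => simp
        | some t =>
          cases hg : d.get? k with
          | none => simp; omega
          | some v => simp

-- A's inner scan, characterized by the two first-occurrence indices
theorem innerA_char (a : String) (n : Int) (i : Int) (l : List (String × Int)) (j : Int) :
    tryResolveInnerA a n i l j =
      (match PySem.List.index? l (a, n + 1), PySem.List.index? l (a, n - 1) with
       | some x, none => some ("left", i, j + (x : Int))
       | some x, some y => if (x : Int) < (y : Int) then some ("left", i, j + (x : Int)) else some ("right", i, j + (y : Int))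
       | none, some y => some ("right", i, j + (y : Int))
       | none, none => none) := by
  induction l generalizing j with
  | nil => simp [tryResolveInnerA, PySem.List.index?]
  | cons lit rest ih =>
    obtain ⟨aj, nj⟩ := lit
    by_cases hL : (aj, nj) = (a, n + 1)
    · have h1 : aj = a := congrArg Prod.fst hL
      have h2 : nj = n + 1 := congrArg Prod.snd hL
      subst h1; subst h2
      rw [PySem.List.index?_cons_self,
          PySem.List.index?_cons_of_ne (x := ((aj : String), n + 1)) (v := (aj, n - 1)) rest (by simp; omega)]
      cases hr : PySem.List.index? rest (aj, n - 1) with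
      | none => simp [tryResolveInnerA]
      | some y =>
        have hy : ((0 : Nat) : Int) < (((y + 1 : Nat)) : Int) := by omega
        simp only [Option.map_some, if_pos hy]
        simp [tryResolveInnerA]
    · by_cases hR : (aj, nj) = (a, n - 1)
      · have h1 : aj = a := congrArg Prod.fst hR
        have h2 : nj = n - 1 := congrArg Prod.snd hR
        subst h1; subst h2
        rw [PySem.List.index?_cons_self,
            PySem.List.index?_cons_of_ne (x := ((aj : String), n - 1)) (v := (aj, n + 1)) rest (by simp; omega)]
        have hne1 : ¬ (n + 1 = n - 1) := by omega
        have hne2 : n = n - 1 + 1 := by omega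
        cases hl2 : PySem.List.index? rest (aj, n + 1) with
        | none => simp [tryResolveInnerA, hne1, ← hne2]
        | some x =>
          have hx : ¬ ((((x + 1 : Nat)) : Int) < ((0 : Nat) : Int)) := by omega
          simp only [Option.map_some, if_neg hx]
          simp [tryResolveInnerA, hne1, ← hne2]
      · have c1 : ¬ (a = aj ∧ n + 1 = nj) := fun ⟨e1, e2⟩ => hL (by rw [e1, e2])
        have c2 : ¬ (a = aj ∧ n = nj + 1) := fun ⟨e1, e2⟩ => hR (by rw [e1]; congr 1; omega)
        rw [PySem.List.index?_cons_of_ne (x := (aj, nj)) (v := (a, n + 1)) rest (fun h => hL h),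
            PySem.List.index?_cons_of_ne (x := (aj, nj)) (v := (a, n - 1)) rest (fun h => hR h)]
        have hstep : tryResolveInnerA a n i ((aj, nj) :: rest) j = tryResolveInnerA a n i rest (j + 1) := by
          simp only [tryResolveInnerA, if_neg c1, if_neg c2]
        rw [hstep, ih (j + 1)]
        cases hl2 : PySem.List.index? rest (a, n + 1) with
        | none =>
          cases hr2 : PySem.List.index? rest (a, n - 1) with
          | none => simp
          | some y => simp; omega
        | some x =>
          cases hr2 : PySem.List.index? rest (a, n - 1) with
          | none => simp; omega
          | some y =>
            have hiff : ((((x + 1 : Nat)) : Int) < (((y + 1 : Nat)) : Int)) = (((x : Nat) : Int) < ((y : Nat) : Int)) := by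
              apply propext; omega
            simp only [Option.map_some, hiff]
            split_ifs <;> simp <;> omega

theorem outer_eq (prop2 : List (String × Int)) (prop1 : List (String × Int)) (i : Int) :
    tryResolveOuterA prop2 prop1 i =
      tryResolveOuterB (tryResolveBuildFirst prop2 0 PySem.Dict.empty) prop1 i := by
  induction prop1 generalizing i with
  | nil => simp [tryResolveOuterA, tryResolveOuterB]
  | cons p rest ih =>
    obtain ⟨a, n⟩ := p
    have hg : ∀ k, (tryResolveBuildFirst prop2 0 PySem.Dict.empty).get? k =
        (PySem.List.index? prop2 k).map (fun t => (t : Int)) := by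
      intro k
      rw [build_get]
      simp
    simp only [tryResolveOuterA, tryResolveOuterB, hg, innerA_char]
    cases PySem.List.index? prop2 (a, n + 1) with
    | none =>
      cases PySem.List.index? prop2 (a, n - 1) with
      | none => simp [ih]
      | some y => simp
    | some x =>
      cases PySem.List.index? prop2 (a, n - 1) with
      | none => simp
      | some y =>
        simp only [Option.map_some]
        split_ifs <;> simp_all

-- ===== VERDICT (by name: the statement is the Claim_ definition above) =====
theorem try_resolve_spec : Claim_equal_try_resolve := by
  intro prop1 prop2 _
  unfold Spec_try_resolve try_resolve try_resolve_alt
  exact outer_eq prop2 prop1 0
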